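-- pv_equiv track=rewrite | github.com/Harshith-Daraboina/bot-heyattrangi | signals.py | is_negated
-- ===== SOURCE A (Python) =====
-- NEGATIONS = ["not", "don't", "never", "wouldn't", "won't", "cant", "can't"]
--
-- def is_negated(text, keyword, window=3):
--     """Checks if a keyword is preceded by a negation in a small window."""
--     tokens = text.lower().split()
--     # Simple token check - strict matching
--     # Find all indices of keyword (substring match in token)
--     matches = [i for i, t in enumerate(tokens) if keyword in t]
--
--     for i in matches:
--         start = max(0, i - window)
--         # check negation in the window before the keyword
--         if any(n in tokens[start:i] for n in NEGATIONS):
--             return True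
--     return False
-- ===== SOURCE B (Python) =====
-- NEGATIONS = ["not", "don't", "never", "wouldn't", "won't", "cant", "can't"]
--
-- def is_negated(text, keyword, window=3):
--     """Streaming one-pass check: keep the last `window` tokens seen so far."""
--     recent = []
--     for t in text.lower().split():
--         if keyword in t and any(n in recent for n in NEGATIONS):
--             return True
--         if window > 0:
--             recent.append(t)
--             if len(recent) > window:
--                 recent = recent[-window:]
--     return False
-- ===== Notes on version B (the rewrite author's own statement) =====
-- stated objective: alternative
-- what changed: Replaces the two-pass build-all-matches-then-slice-per-match scan with a single streaming pass that maintains a bounded list of the last `window` tokens and exits early at the first negated match.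
import Mathlib
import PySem

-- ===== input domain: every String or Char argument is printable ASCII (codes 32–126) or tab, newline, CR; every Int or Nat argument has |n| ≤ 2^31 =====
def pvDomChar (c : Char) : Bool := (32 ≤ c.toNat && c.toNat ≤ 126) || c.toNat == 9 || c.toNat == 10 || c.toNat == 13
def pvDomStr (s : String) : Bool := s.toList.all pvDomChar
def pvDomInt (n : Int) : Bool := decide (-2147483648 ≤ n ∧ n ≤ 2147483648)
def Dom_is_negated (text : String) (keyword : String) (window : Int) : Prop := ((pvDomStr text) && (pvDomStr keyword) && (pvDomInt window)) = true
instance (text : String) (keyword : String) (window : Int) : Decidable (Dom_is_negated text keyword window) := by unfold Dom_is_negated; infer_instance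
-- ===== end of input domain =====

-- B replaces A's two-pass "collect all keyword matches, then slice a window per match" with
-- one streaming pass that maintains the last `window` tokens and exits early (objective: alternative).

def NEGATIONS : List String := ["not", "don't", "never", "wouldn't", "won't", "cant", "can't"]

-- ===== PORT A =====
-- 'for i in matches: if any(...): return True' as structural recursion over matches
def is_negated_loopA (tokens : List String) (window : Int) : List Int → Bool
  | [] => false
  | i :: rest =>
    let start := max 0 (i - window)
    if NEGATIONS.any (fun n => (PySem.List.slice tokens (some start) (some i)).contains n) then
      true
    else
      is_negated_loopA tokens window rest

def is_negated (text : String) (keyword : String) (window : Int) : Bool :=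
  let tokens := PySem.Str.split₀ (PySem.Str.lower text)
  let ms := (PySem.List.enumerate tokens 0).foldl
    (fun acc q => if PySem.Str.isIn keyword q.2 then acc ++ [q.1] else acc) []
  is_negated_loopA tokens window ms

-- ===== PORT B =====
-- the streaming loop of Source B: recent = last `window` tokens seen so far
def is_negated_loopB (keyword : String) (window : Int) : List String → List String → Bool
  | _, [] => false
  | recent, t :: rest =>
    if PySem.Str.isIn keyword t && NEGATIONS.any (fun n => recent.contains n) then
      true
    else
      let recent' :=
        if 0 < window then
          let r := recent ++ [t]
          if (r.length : Int) > window then PySem.List.slice r (some (-window)) none else r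
        else recent
      is_negated_loopB keyword window recent' rest

def is_negated_alt (text : String) (keyword : String) (window : Int) : Bool :=
  is_negated_loopB keyword window [] (PySem.Str.split₀ (PySem.Str.lower text))

-- ===== PRECONDITION & SPEC =====
def Spec_is_negated (text : String) (keyword : String) (window : Int) (out : Bool) : Prop := out = is_negated_alt text keyword window
instance (text : String) (keyword : String) (window : Int) (out : Bool) : Decidable (Spec_is_negated text keyword window out) := by unfold Spec_is_negated; infer_instance

-- ===== CLAIM (what is proved, stated in full; the proofs are below) =====
def Claim_equal_is_negated : Prop := ∀ (text : String) (keyword : String) (window : Int), Dom_is_negated text keyword window → Spec_is_negated text keyword window (is_negated text keyword window)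

-- ===== LEMMAS AND PROOFS =====

-- the window of tokens frame: last `window` elements of the prefix p (empty if window ≤ 0)
def wnd (w : Int) (p : List String) : List String :=
  if 0 < w then p.drop (p.length - w.toNat) else []

theorem wnd_nil (w : Int) : wnd w [] = [] := by
  unfold wnd; split <;> simp

-- Python r[-w:] for 0 < w
theorem slice_neg_from (r : List String) (w : Int) (hw : 0 < w) :
    PySem.List.slice r (some (-w)) none = r.drop (r.length - w.toNat) := by
  have h : -w = -((w.toNat : Nat) : Int) := by omega
  rw [h, PySem.List.slice_from_neg_natCast _ _ (by omega)]

-- B's trimming step keeps the invariant recent = wnd w prefix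
theorem wnd_step (w : Int) (p : List String) (t : String) :
    (if 0 < w then
      let r := wnd w p ++ [t]
      if (r.length : Int) > w then PySem.List.slice r (some (-w)) none else r
     else wnd w p) = wnd w (p ++ [t]) := by
  by_cases hw : 0 < w
  · simp only [hw, if_true]
    unfold wnd
    simp only [hw, if_true]
    by_cases hbig : w.toNat ≤ p.length
    · have hlen : ((p.drop (p.length - w.toNat) ++ [t]).length : Int) > w := by
        simp [List.length_drop]; omega
      rw [if_pos hlen, slice_neg_from _ _ hw]
      have h1 : (p.drop (p.length - w.toNat) ++ [t]).length - w.toNat = 1 := by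
        simp [List.length_drop]; omega
      rw [h1]
      have hL : (p.drop (p.length - w.toNat) ++ [t]).drop 1 =
          (p.drop (p.length - w.toNat)).drop 1 ++ [t] :=
        List.drop_append_of_le_length (by simp [List.length_drop]; omega)
      rw [hL, List.drop_drop]
      have h2 : (p ++ [t]).length - w.toNat = (p.length - w.toNat) + 1 := by
        simp [List.length_append]; omega
      rw [h2]
      have hR : (p ++ [t]).drop ((p.length - w.toNat) + 1) =
          p.drop ((p.length - w.toNat) + 1) ++ [t] :=
        List.drop_append_of_le_length (by omega)
      rw [hR]
    · have hlen : ¬ ((p.drop (p.length - w.toNat) ++ [t]).length : Int) > w := by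
        simp [List.length_drop]; omega
      rw [if_neg hlen]
      have h0 : p.length - w.toNat = 0 := by omega
      have h2 : (p ++ [t]).length - w.toNat = 0 := by simp [List.length_append]; omega
      rw [h0, h2]
      simp
  · simp [wnd, hw]

-- A's slice tokens[max(0,i-window):i] is the window frame of the prefix take k
theorem slice_eq_wnd (tokens : List String) (w : Int) (k : Nat) (hk : k ≤ tokens.length) :
    PySem.List.slice tokens (some (max 0 ((k : Int) - w))) (some (k : Int)) =
      wnd w (tokens.take k) := by
  have h0 : (0 : Int) ≤ max 0 ((k : Int) - w) := le_max_left _ _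
  rw [PySem.List.slice_toNat tokens h0 (by omega)]
  by_cases hw : 0 < w
  · unfold wnd
    rw [if_pos hw, List.drop_take]
    have hlt : (tokens.take k).length = k := by simp [hk]
    rw [hlt]
    have ha : (max 0 ((k : Int) - w)).toNat = k - w.toNat := by omega
    have hkn : ((k : Int)).toNat = k := by omega
    rw [ha, hkn]
  · unfold wnd
    rw [if_neg hw]
    have h1 : ((k : Int)).toNat - (max 0 ((k : Int) - w)).toNat = 0 := by omega
    rw [h1, List.take_zero]

-- any-congruence under membership
theorem any_congr_mem {α : Type} (l : List α) (f g : α → Bool)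
    (h : ∀ x ∈ l, f x = g x) : l.any f = l.any g := by
  induction l with
  | nil => rfl
  | cons x xs ih =>
    simp only [List.any_cons]
    rw [h x (by simp), ih (fun y hy => h y (by simp [hy]))]

theorem any_filter' {α : Type} (l : List α) (p q : α → Bool) :
    (l.filter p).any q = l.any (fun x => p x && q x) := by
  induction l with
  | nil => rfl
  | cons x xs ih => by_cases hx : p x <;> simp [hx, ih]

-- A's early-return loop is an `any`
theorem loopA_eq_any (tokens : List String) (w : Int) (ms : List Int) :
    is_negated_loopA tokens w ms =
      ms.any (fun i => NEGATIONS.any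
        (fun n => (PySem.List.slice tokens (some (max 0 (i - w))) (some i)).contains n)) := by
  induction ms with
  | nil => rfl
  | cons i rest ih =>
    simp only [is_negated_loopA, List.any_cons]
    split <;> simp_all

-- B's streaming loop, started on the frame of a prefix, is an `any` over the suffix
theorem loopB_eq_any (kw : String) (w : Int) (tokens : List String) :
    ∀ (ts p : List String), tokens = p ++ ts →
      is_negated_loopB kw w (wnd w p) ts =
        (PySem.List.enumerate ts (p.length : Int)).any
          (fun q => PySem.Str.isIn kw q.2 &&
            NEGATIONS.any (fun n => (wnd w (tokens.take q.1.toNat)).contains n)) := by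
  intro ts
  induction ts with
  | nil => intro p _; rfl
  | cons t rest ih =>
    intro p hp
    rw [PySem.List.enumerate_cons, List.any_cons]
    simp only [is_negated_loopB]
    have htake : tokens.take ((p.length : Int)).toNat = p := by
      rw [hp]; simp
    rw [htake]
    have hstep := wnd_step w p t
    simp only at hstep
    rw [hstep]
    have hp' : tokens = (p ++ [t]) ++ rest := by simp [hp]
    have := ih (p ++ [t]) hp'
    have hlen : ((p ++ [t]).length : Int) = (p.length : Int) + 1 := by simp
    rw [hlen] at this
    rw [this]
    split <;> simp_all

-- the comprehension of A: matches = indices of keyword-containing tokens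
theorem matches_eq (kw : String) (tokens : List String) :
    (PySem.List.enumerate tokens 0).foldl
      (fun acc q => if PySem.Str.isIn kw q.2 then acc ++ [q.1] else acc) [] =
      (((PySem.List.enumerate tokens 0).filter (fun q => PySem.Str.isIn kw q.2)).map (·.1)) := by
  rw [PySem.List.foldl_append_if]
  simp

-- ===== VERDICT (by name: the statement is the Claim_ definition above) =====
theorem is_negated_spec : Claim_equal_is_negated := by
  intro text keyword window _
  unfold Spec_is_negated
  simp only [is_negated, is_negated_alt]
  set tokens := PySem.Str.split₀ (PySem.Str.lower text) with htok
  rw [matches_eq, loopA_eq_any, List.any_map, any_filter']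
  have hB := loopB_eq_any keyword window tokens tokens [] (by simp)
  rw [wnd_nil] at hB
  simp only [List.length_nil, Nat.cast_zero] at hB
  rw [hB]
  apply any_congr_mem
  intro q hq
  rcases (PySem.List.mem_enumerate_iff _ _ _).mp hq with ⟨k, hk, rfl⟩
  simp only [Function.comp]
  have hzero : ((0 : Int) + (k : Int)) = (k : Int) := by ring
  rw [hzero]
  have hkn : ((k : Int)).toNat = k := by omega
  rw [hkn, slice_eq_wnd tokens window k (le_of_lt hk)]
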